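-- pv_equiv track=rewrite | github.com/111wangyechen/vscode-code-spell-checker-plus | backend/algorithm/pinyinChecker.py | _tokens
-- ===== SOURCE A (Python) =====
-- def _tokens(text: str):
--     res = []
--     i = 0
--     w = ""
--     for ch in text:
--         if "a" <= ch <= "z":
--             w += ch
--         else:
--             if w:
--                 res.append((i - len(w), i, w))
--                 w = ""
--         i += 1
--     if w:
--         res.append((i - len(w), i, w))
--     return res
-- ===== SOURCE B (Python) =====
-- def _tokens(text: str):
--     res = []
--     n = len(text)
--     i = 0
--     while i < n:
--         if "a" <= text[i] <= "z":
--             j = i + 1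
--             while j < n and "a" <= text[j] <= "z":
--                 j += 1
--             res.append((i, j, text[i:j]))
--             i = j
--         else:
--             i += 1
--     return res
-- ===== Notes on version B (the rewrite author's own statement) =====
-- stated objective: alternative
-- what changed: Replaces A's per-character state machine (growing accumulator string w flushed at each boundary and after the loop) with a two-pointer run scanner: skip non-lowercase characters, find the end of each maximal lowercase run with an inner scan, and emit the slice directly, so no accumulator string and no post-loop flush exist.
import Mathlib
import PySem

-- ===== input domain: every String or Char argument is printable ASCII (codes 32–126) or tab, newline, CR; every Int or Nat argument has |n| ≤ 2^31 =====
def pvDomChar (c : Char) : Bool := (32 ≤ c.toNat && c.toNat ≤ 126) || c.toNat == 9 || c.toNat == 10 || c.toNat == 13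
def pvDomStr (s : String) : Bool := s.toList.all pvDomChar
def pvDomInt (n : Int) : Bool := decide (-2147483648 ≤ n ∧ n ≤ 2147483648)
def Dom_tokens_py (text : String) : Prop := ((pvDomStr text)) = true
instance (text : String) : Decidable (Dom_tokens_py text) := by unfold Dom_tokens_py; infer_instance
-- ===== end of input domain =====

-- B replaces A's accumulator-string state machine with a two-pointer maximal-run scanner (objective: alternative).


-- ===== PORT A =====
-- state (res, i, w): result so far, current index, current accumulated word (as in A)
def tokensA_step (st : List (Int × Int × String) × Int × List Char) (ch : Char) :
    List (Int × Int × String) × Int × List Char :=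
  let (res, i, w) := st
  if 'a' ≤ ch ∧ ch ≤ 'z' then (res, i + 1, w ++ [ch])
  else if w ≠ [] then (res ++ [(i - w.length, i, String.ofList w)], i + 1, [])
  else (res, i + 1, [])

-- the post-loop flush of A ("if w: res.append(...)")
def tokensA_finish (st : List (Int × Int × String) × Int × List Char) :
    List (Int × Int × String) :=
  let (res, i, w) := st
  if w ≠ [] then res ++ [(i - w.length, i, String.ofList w)] else res

def tokens_py (text : String) : List (Int × Int × String) :=
  tokensA_finish (text.toList.foldl tokensA_step ([], 0, []))

-- ===== PORT B =====
def pvIsLower (c : Char) : Bool := 'a' ≤ c && c ≤ 'z'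

-- outer while loop of B: skip a non-lowercase char, or scan the whole maximal run
-- (inner while j-loop = takeWhile/dropWhile over the rest) and emit the slice
def tokensB_go (i : Nat) : List Char → List (Int × Int × String)
  | [] => []
  | c :: cs =>
    if pvIsLower c then
      let run := c :: cs.takeWhile pvIsLower
      ((i : Int), (i : Int) + run.length, String.ofList run) ::
        tokensB_go (i + run.length) (cs.dropWhile pvIsLower)
    else
      tokensB_go (i + 1) cs
termination_by cs => cs.length
decreasing_by
  · simpa using Nat.lt_succ_of_le (cs.length_dropWhile_le pvIsLower)
  · simp

def tokens_py_alt (text : String) : List (Int × Int × String) :=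
  tokensB_go 0 text.toList

-- ===== PRECONDITION & SPEC =====
def Spec_tokens_py (text : String) (out : List (Int × Int × String)) : Prop := out = tokens_py_alt text
instance (text : String) (out : List (Int × Int × String)) : Decidable (Spec_tokens_py text out) := by unfold Spec_tokens_py; infer_instance

-- ===== CLAIM (what is proved, stated in full; the proofs are below) =====
def Claim_equal_tokens_py : Prop := ∀ (text : String), Dom_tokens_py text → Spec_tokens_py text (tokens_py text)

-- ===== LEMMAS AND PROOFS =====

-- A's result list only grows by appends: factor the accumulated prefix out of the fold
theorem tokensA_finish_foldl_append (cs : List Char) (r : List (Int × Int × String))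
    (i : Int) (w : List Char) :
    tokensA_finish (cs.foldl tokensA_step (r, i, w)) =
      r ++ tokensA_finish (cs.foldl tokensA_step ([], i, w)) := by
  induction cs generalizing r i w with
  | nil => by_cases hv : w = [] <;> simp [tokensA_finish, hv]
  | cons c cs ih =>
    simp only [List.foldl_cons, tokensA_step]
    split_ifs with h1 h2
    · exact ih r _ _
    · simp only [List.nil_append]
      rw [ih, ih [(i - (w.length : Int), i, String.ofList w)]]
      simp
    · exact ih r _ _

-- main invariant: finishing A's fold from state ([], i, w) equals B's run scanner,
-- with a pending word w belonging to the run that started at i - |w|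
theorem tokensA_invariant (cs : List Char) (i : Nat) (w : List Char) :
    tokensA_finish (cs.foldl tokensA_step ([], (i : Int), w)) =
      (if w = [] then tokensB_go i cs
       else ((i : Int) - w.length,
             (i : Int) + (cs.takeWhile pvIsLower).length,
             String.ofList (w ++ cs.takeWhile pvIsLower)) ::
            tokensB_go (i + (cs.takeWhile pvIsLower).length) (cs.dropWhile pvIsLower)) := by
  induction cs generalizing i w with
  | nil =>
    by_cases h : w = [] <;> simp [tokensA_finish, tokensB_go, h]
  | cons c cs ih =>
    by_cases hc : pvIsLower c
    · have hc' : 'a' ≤ c ∧ c ≤ 'z' := by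
        simpa [pvIsLower, Bool.and_eq_true, decide_eq_true_eq] using hc
      have step : tokensA_step ([], (i : Int), w) c = ([], (i : Int) + 1, w ++ [c]) := by
        simp [tokensA_step, hc']
      have hcast : ((i : Int) + 1) = ((i + 1 : Nat) : Int) := by push_cast; ring
      rw [List.foldl_cons, step, hcast, ih (i + 1) (w ++ [c])]
      have hne : w ++ [c] ≠ [] := by simp
      rw [if_neg hne]
      simp only [List.takeWhile_cons_of_pos hc, List.dropWhile_cons_of_pos hc]
      by_cases h : w = []
      · subst h
        rw [if_pos rfl]
        simp only [tokensB_go, hc, if_pos]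
        simp only [List.cons.injEq, Prod.mk.injEq]
        refine ⟨⟨by simp; try omega, by simp; try omega, by simp⟩, by congr 1; simp; omega⟩
      · rw [if_neg h]
        simp only [List.cons.injEq, Prod.mk.injEq]
        refine ⟨⟨by simp; try omega, by simp; try omega, by simp⟩, by congr 1; simp; omega⟩
    · have hc' : ¬ ('a' ≤ c ∧ c ≤ 'z') := by
        simpa [pvIsLower, Bool.and_eq_true, decide_eq_true_eq] using hc
      by_cases h : w = []
      · subst h
        have step : tokensA_step ([], (i : Int), []) c = ([], (i : Int) + 1, []) := by
          simp [tokensA_step, hc']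
        have hcast : ((i : Int) + 1) = ((i + 1 : Nat) : Int) := by push_cast; ring
        rw [List.foldl_cons, step, hcast, ih (i + 1) [], if_pos rfl, if_pos rfl]
        simp [tokensB_go, hc]
      · have step : tokensA_step ([], (i : Int), w) c =
            ([((i : Int) - w.length, (i : Int), String.ofList w)], (i : Int) + 1, []) := by
          simp [tokensA_step, hc', h]
        have hcast : ((i : Int) + 1) = ((i + 1 : Nat) : Int) := by push_cast; ring
        rw [List.foldl_cons, step, hcast, tokensA_finish_foldl_append,
          ih (i + 1) [], if_pos rfl, if_neg h]
        simp only [List.takeWhile_cons_of_neg hc, List.dropWhile_cons_of_neg hc,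
          List.length_nil, Nat.add_zero, Int.natCast_zero, Int.add_zero, List.append_nil]
        simp [tokensB_go, hc]

-- ===== VERDICT (by name: the statement is the Claim_ definition above) =====
theorem tokens_py_spec : Claim_equal_tokens_py := by
  intro text _
  show tokens_py text = tokens_py_alt text
  unfold tokens_py tokens_py_alt
  have h := tokensA_invariant text.toList 0 []
  simpa using h
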